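-- pv_equiv track=rewrite | github.com/moongni/Algorithm | baekjoon/탐욕 알고리즘/1449_수리공항승.py | solution
-- ===== SOURCE A (Python) =====
-- def solution(length, points):
--     points.sort()
--
--     start = points[0]
--     cnt = 0
--     for point in points:
--         # 시작점부터 끝까지 거리
--         diff = point - start
--         if diff >= length:
--             start = point
--             cnt += 1
--
--     return cnt + 1
-- ===== SOURCE B (Python) =====
-- def solution(length, points):
--     # Binary-search jumps: from each tape start, bisect straight to the next
--     # point not yet covered instead of scanning point by point.  Sorts points
--     # in place like the original; raises IndexError on an empty list likewise.
--     points.sort()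
--     start = points[0]
--     cnt = 0
--     i = 0
--     n = len(points)
--     while True:
--         j = _first_at_least(points, start + length, i)
--         if j >= n:
--             break
--         start = points[j]
--         cnt += 1
--         i = j + 1
--     return cnt + 1
--
--
-- def _first_at_least(a, x, lo):
--     # index of the first element >= x in sorted a[lo:], or len(a)
--     hi = len(a)
--     while lo < hi:
--         mid = (lo + hi) // 2
--         if a[mid] < x:
--             lo = mid + 1
--         else:
--             hi = mid
--     return lo
-- ===== Notes on version B (the rewrite author's own statement) =====
-- stated objective: alternative
-- what changed: Replaces A's element-by-element greedy scan with hand-rolled binary-search jumps: from each tape start, bisect straight to the first point not yet covered.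
import Mathlib
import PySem

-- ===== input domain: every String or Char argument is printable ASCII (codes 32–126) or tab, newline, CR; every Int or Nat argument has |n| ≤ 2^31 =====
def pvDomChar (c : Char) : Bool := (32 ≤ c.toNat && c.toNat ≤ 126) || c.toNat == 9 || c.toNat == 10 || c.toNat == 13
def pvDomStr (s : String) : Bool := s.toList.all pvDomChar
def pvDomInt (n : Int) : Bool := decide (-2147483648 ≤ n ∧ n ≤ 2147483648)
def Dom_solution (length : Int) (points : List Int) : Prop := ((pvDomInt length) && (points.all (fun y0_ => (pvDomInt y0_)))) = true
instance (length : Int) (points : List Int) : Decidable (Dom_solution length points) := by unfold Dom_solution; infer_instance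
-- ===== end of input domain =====

-- B replaces A's element-by-element greedy scan with hand-rolled binary-search jumps to
-- the next uncovered point (same return value; both sort `points` in place in Python).

-- ===== PORT A =====
def solutionStep (length : Int) (acc : Int × Int) (point : Int) : Int × Int :=
  if point - acc.1 ≥ length then (point, acc.2 + 1) else acc

-- body of A after the in-place sort (pts = the sorted list)
def solutionGo (length : Int) (pts : List Int) : Int :=
  match PySem.List.pyGet? pts 0 with
  | none => 0  -- IndexError on empty list; excluded by Pre_solution
  | some s0 => (pts.foldl (solutionStep length) (s0, 0)).2 + 1

def solution (length : Int) (points : List Int) : Int :=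
  solutionGo length (PySem.List.sorted points (fun x => x) false)

-- ===== PORT B =====
-- hand-rolled bisect of Source B (`_first_at_least`), transliterated; a[mid] is in range,
-- ported with getD (exact for lo < hi ≤ a.length)
def firstAtLeast (a : List Int) (x : Int) (lo hi : Nat) : Nat :=
  if h : lo < hi then
    let mid := (lo + hi) / 2
    if a.getD mid 0 < x then firstAtLeast a x (mid + 1) hi
    else firstAtLeast a x lo mid
  else lo
termination_by hi - lo
decreasing_by all_goals omega

-- the `while True` loop of Source B; fuel = pts.length makes it total (i strictly increases)
def jumpLoop (length : Int) (pts : List Int) (fuel : Nat) (i : Nat) (start cnt : Int) : Int :=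
  match fuel with
  | 0 => cnt + 1
  | fuel + 1 =>
    let j := firstAtLeast pts (start + length) i pts.length
    if j < pts.length then
      jumpLoop length pts fuel (j + 1) (pts.getD j 0) (cnt + 1)
    else cnt + 1

-- body of Source B after the in-place sort
def solutionAltGo (length : Int) (pts : List Int) : Int :=
  match PySem.List.pyGet? pts 0 with
  | none => 0  -- IndexError on empty list; excluded by Pre_solution
  | some s0 => jumpLoop length pts pts.length 0 s0 0

def solution_alt (length : Int) (points : List Int) : Int :=
  solutionAltGo length (PySem.List.sorted points (fun x => x) false)

-- ===== PRECONDITION & SPEC =====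
-- Pre_ excludes only the empty list, on which A (points[0]) raises IndexError.
def Pre_solution (length : Int) (points : List Int) : Prop := points ≠ []
instance (length : Int) (points : List Int) : Decidable (Pre_solution length points) := by
  unfold Pre_solution; infer_instance
def pvWitness_solution : Int × List Int := (2, [1, 5, 3])

def Spec_solution (length : Int) (points : List Int) (out : Int) : Prop := out = solution_alt length points
instance (length : Int) (points : List Int) (out : Int) : Decidable (Spec_solution length points out) := by unfold Spec_solution; infer_instance

-- ===== CLAIM (what is proved, stated in full; the proofs are below) =====
def Claim_equal_solution : Prop := ∀ (length : Int) (points : List Int), Dom_solution length points → Pre_solution length points → Spec_solution length points (solution length points)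

-- ===== LEMMAS AND PROOFS =====

-- monotone-by-index reading of a sorted list (via getD)
def MonoD (a : List Int) : Prop := ∀ k l : Nat, k ≤ l → l < a.length → a.getD k 0 ≤ a.getD l 0

theorem monoD_of_pairwise {a : List Int} (h : a.Pairwise (· ≤ ·)) : MonoD a := by
  intro k l hkl hl
  rcases Nat.eq_or_lt_of_le hkl with rfl | hlt
  · exact le_refl _
  · have hk : k < a.length := Nat.lt_trans hlt hl
    rw [List.getD_eq_getElem a 0 hk, List.getD_eq_getElem a 0 hl]
    exact List.pairwise_iff_getElem.mp h k l hk hl hlt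

theorem firstAtLeast_spec (a : List Int) (x : Int) :
    ∀ lo hi : Nat, MonoD a → lo ≤ hi → hi ≤ a.length →
      lo ≤ firstAtLeast a x lo hi ∧ firstAtLeast a x lo hi ≤ hi ∧
      (∀ k, lo ≤ k → k < firstAtLeast a x lo hi → a.getD k 0 < x) ∧
      (firstAtLeast a x lo hi < hi → x ≤ a.getD (firstAtLeast a x lo hi) 0) := by
  intro lo hi
  induction lo, hi using firstAtLeast.induct a x with
  | case1 lo hi h mid hlt ih =>
    intro mono hle hhi
    have hmid : mid = (lo + hi) / 2 := rfl
    rw [firstAtLeast, dif_pos h, ← hmid, if_pos hlt]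
    obtain ⟨h1, h2, h3, h4⟩ := ih mono (by omega) hhi
    refine ⟨by omega, h2, ?_, h4⟩
    intro k hk hkr
    by_cases hkm : k ≤ mid
    · exact lt_of_le_of_lt (mono k mid hkm (by omega)) hlt
    · exact h3 k (by omega) hkr
  | case2 lo hi h mid hge ih =>
    intro mono hle hhi
    have hmid : mid = (lo + hi) / 2 := rfl
    rw [firstAtLeast, dif_pos h, ← hmid, if_neg hge]
    obtain ⟨h1, h2, h3, h4⟩ := ih mono (by omega) (by omega)
    refine ⟨h1, by omega, h3, ?_⟩
    intro hr
    by_cases hrm : firstAtLeast a x lo mid < mid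
    · exact h4 hrm
    · have : firstAtLeast a x lo mid = mid := by omega
      rw [this]; omega
  | case3 lo hi h =>
    intro mono hle hhi
    rw [firstAtLeast, dif_neg h]
    exact ⟨le_refl _, by omega, by omega, by omega⟩

-- skipping covered points leaves the fold state unchanged
theorem foldl_skip (length : Int) (l : List Int) (start cnt : Int)
    (h : ∀ p ∈ l, p - start < length) :
    l.foldl (solutionStep length) (start, cnt) = (start, cnt) := by
  induction l with
  | nil => rfl
  | cons p t ih =>
    have hp := h p (List.mem_cons_self)
    simp only [List.foldl_cons, solutionStep, if_neg (by omega : ¬ p - start ≥ length)]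
    exact ih (fun q hq => h q (List.mem_cons_of_mem _ hq))

-- main loop invariant: A's fold over the remaining suffix equals B's jump loop
theorem main_inv (length : Int) (pts : List Int) (mono : MonoD pts) :
    ∀ fuel i : Nat, ∀ start cnt : Int, i ≤ pts.length → pts.length ≤ fuel + i →
      ((pts.drop i).foldl (solutionStep length) (start, cnt)).2 + 1
        = jumpLoop length pts fuel i start cnt := by
  intro fuel
  induction fuel with
  | zero =>
    intro i start cnt hi hf
    have : pts.drop i = [] := List.drop_eq_nil_of_le (by omega)
    simp [jumpLoop, this]
  | succ fuel ih =>
    intro i start cnt hi hf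
    set j := firstAtLeast pts (start + length) i pts.length with hj
    obtain ⟨hj1, hj2, hj3, hj4⟩ :=
      firstAtLeast_spec pts (start + length) i pts.length mono hi (le_refl _)
    rw [← hj] at hj1 hj2 hj3 hj4
    -- decompose the suffix: covered segment ++ rest from j
    have hdecomp : pts.drop i
        = (pts.drop i).take (j - i) ++ pts.drop j := by
      have hdd : (pts.drop i).drop (j - i) = pts.drop j := by
        rw [List.drop_drop]; congr 1; omega
      conv_lhs => rw [← List.take_append_drop (j - i) (pts.drop i)]
      rw [hdd]
    have hseg : ∀ p ∈ (pts.drop i).take (j - i), p - start < length := by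
      intro p hp
      obtain ⟨k, hk, hpk⟩ := List.mem_iff_getElem.mp hp
      have hklen : k < (pts.drop i).length := (List.length_take ..) ▸ hk |>.trans_le (by simp)
      rw [List.getElem_take, List.getElem_drop] at hpk
      have hkj : i + k < j := by
        have := (List.length_take ..) ▸ hk
        omega
      have hlt := hj3 (i + k) (by omega) hkj
      have : pts.getD (i + k) 0 = p := by
        rw [List.getD_eq_getElem pts 0 (by
          have hdl : (pts.drop i).length = pts.length - i := List.length_drop ..
          omega)]
        exact hpk
      omega
    rw [hdecomp, List.foldl_append, foldl_skip length _ start cnt hseg]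
    rw [jumpLoop]
    by_cases hjlt : j < pts.length
    · rw [if_pos hjlt]
      have hxj : pts.getD j 0 - start ≥ length := by have := hj4 hjlt; omega
      have hdj : pts.drop j = pts.getD j 0 :: pts.drop (j + 1) := by
        rw [List.getD_eq_getElem pts 0 hjlt]
        exact List.drop_eq_getElem_cons hjlt
      rw [hdj]
      simp only [List.foldl_cons, solutionStep, if_pos hxj]
      exact ih (j + 1) (pts.getD j 0) (cnt + 1) (by omega) (by omega)
    · rw [if_neg hjlt]
      have hjeq : j = pts.length := by omega
      have hnil : pts.drop j = [] := by rw [hjeq, List.drop_length]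
      rw [hnil]
      rfl

-- ===== VERDICT (by name: the statement is the Claim_ definition above) =====
theorem solution_spec : Claim_equal_solution := by
  intro length points _ hne
  unfold Spec_solution solution solution_alt
  unfold solutionGo solutionAltGo
  set pts := PySem.List.sorted points (fun x => x) false with hpts
  have hptsne : pts ≠ [] := by
    rw [hpts, Ne, PySem.List.sorted_eq_nil_iff]; exact hne
  have hlen0 : 0 < pts.length := List.length_pos_iff.mpr hptsne
  have hget : PySem.List.pyGet? pts 0 = some (pts.getD 0 0) := by
    rw [PySem.List.pyGet?_zero, List.getElem?_eq_getElem hlen0,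
        List.getD_eq_getElem pts 0 hlen0]
  rw [hget]
  dsimp only
  have mono : MonoD pts := monoD_of_pairwise (PySem.List.sorted_pairwise points (fun x => x))
  have := main_inv length pts mono pts.length 0 (pts.getD 0 0) 0 (by omega) (by omega)
  rw [List.drop_zero] at this
  exact this
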